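-- pv_equiv track=rewrite | github.com/darkraven92/CodeAbbey | problems/131_four_pics_one_word.py | is_word_subset_of_letters
-- ===== SOURCE A (Python) =====
-- def is_word_subset_of_letters(word, letters):
--     letter_counts = {}
--     for letter in letters:
--         letter_counts[letter] = letter_counts.get(letter, 0) + 1
--
--     for char in word:
--         if char not in letter_counts or letter_counts[char] == 0:
--             return False
--         letter_counts[char] -= 1
--     return True
-- ===== SOURCE B (Python) =====
-- def is_word_subset_of_letters(word, letters):
--     need = {}
--     for ch in word:
--         need[ch] = need.get(ch, 0) + 1
--     have = {}
--     for ch in letters: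
--         have[ch] = have.get(ch, 0) + 1
--     return all(have.get(ch, 0) >= n for ch, n in need.items())
-- ===== Notes on version B (the rewrite author's own statement) =====
-- stated objective: alternative
-- what changed: Replaces A's single consume-and-decrement pass with early return by two independent frequency tables (word and letters) and a final pointwise subset comparison over the word's counted items.
import Mathlib
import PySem

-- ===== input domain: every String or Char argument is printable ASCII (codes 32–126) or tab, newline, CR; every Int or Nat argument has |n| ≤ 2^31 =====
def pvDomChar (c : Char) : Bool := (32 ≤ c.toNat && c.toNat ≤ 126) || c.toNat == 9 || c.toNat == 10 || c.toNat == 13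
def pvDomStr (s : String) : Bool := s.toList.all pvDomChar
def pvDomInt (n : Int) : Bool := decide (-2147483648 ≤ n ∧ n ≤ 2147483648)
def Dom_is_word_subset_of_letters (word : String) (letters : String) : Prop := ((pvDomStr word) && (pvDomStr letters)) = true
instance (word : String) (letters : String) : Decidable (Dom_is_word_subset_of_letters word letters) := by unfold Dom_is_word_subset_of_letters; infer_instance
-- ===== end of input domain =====

-- B replaces A's consume-and-decrement pass (with early return) by two independent
-- frequency tables compared pointwise; same cost, different decomposition.


-- ===== PORT A =====
-- the 'for char in word' loop with its early 'return False'
def awConsume (chars : List Char) (d : PySem.Dict Char Int) : Bool :=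
  match chars with
  | [] => true
  | c :: rest =>
    if !(d.contains c) || d.getD c 0 == 0 then false
    else awConsume rest (d.modify c 0 (fun v => v - 1))

def is_word_subset_of_letters (word : String) (letters : String) : Bool :=
  let letter_counts :=
    letters.toList.foldl (fun d c => d.insert c (d.getD c 0 + 1)) PySem.Dict.empty
  awConsume word.toList letter_counts

-- ===== PORT B =====
def is_word_subset_of_letters_alt (word : String) (letters : String) : Bool :=
  let need := word.toList.foldl (fun d c => d.insert c (d.getD c 0 + 1)) PySem.Dict.empty
  let hav := letters.toList.foldl (fun d c => d.insert c (d.getD c 0 + 1)) PySem.Dict.empty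
  need.items.all (fun (p : Char × Int) => decide (p.2 ≤ hav.getD p.1 (0 : Int)))

-- ===== PRECONDITION & SPEC =====
def Spec_is_word_subset_of_letters (word : String) (letters : String) (out : Bool) : Prop := out = is_word_subset_of_letters_alt word letters
instance (word : String) (letters : String) (out : Bool) : Decidable (Spec_is_word_subset_of_letters word letters out) := by unfold Spec_is_word_subset_of_letters; infer_instance

-- ===== CLAIM (what is proved, stated in full; the proofs are below) =====
def Claim_equal_is_word_subset_of_letters : Prop := ∀ (word : String) (letters : String), Dom_is_word_subset_of_letters word letters → Spec_is_word_subset_of_letters word letters (is_word_subset_of_letters word letters)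

-- ===== LEMMAS AND PROOFS =====

-- A's consume loop succeeds iff every char of the word has enough budget in the dict.
theorem awConsume_eq_true_iff (chars : List Char) (d : PySem.Dict Char Int)
    (h : ∀ c, 0 ≤ d.getD c 0) :
    awConsume chars d = true ↔ ∀ c ∈ chars, (chars.count c : Int) ≤ d.getD c 0 := by
  induction chars generalizing d with
  | nil => simp [awConsume]
  | cons c rest ih =>
    by_cases hz : d.getD c 0 = 0
    · have hcond : (!(d.contains c) || d.getD c 0 == 0) = true := by simp [hz]
      constructor
      · intro hfalse
        simp [awConsume, hcond] at hfalse
      · intro hall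
        exfalso
        have hcc := hall c (by simp)
        have hcp : (c :: rest).count c = rest.count c + 1 := List.count_cons_self
        rw [hz, hcp] at hcc
        omega
    · have hcontains : d.contains c = true := by
        by_contra hnc
        exact hz (PySem.Dict.getD_of_not_contains _ _ (by simpa using hnc))
      have hcond : (!(d.contains c) || d.getD c 0 == 0) = false := by
        simp [hcontains, hz]
      have hpos : 0 < d.getD c 0 := lt_of_le_of_ne (h c) (Ne.symm hz)
      have h' : ∀ c', 0 ≤ (d.modify c 0 (fun v => v - 1)).getD c' 0 := by
        intro c'
        rw [PySem.Dict.getD_modify]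
        split_ifs with he
        · subst he; omega
        · exact h c'
      rw [awConsume, hcond]
      simp only [Bool.false_eq_true, if_false]
      rw [ih _ h']
      constructor
      · intro hall c' hc'
        by_cases he : c' = c
        · subst he
          by_cases hm : c' ∈ rest
          · have hthis := hall c' hm
            rw [PySem.Dict.getD_modify, if_pos rfl] at hthis
            rw [List.count_cons_self]
            push_cast
            omega
          · rw [List.count_cons_self, List.count_eq_zero_of_not_mem hm]
            push_cast
            omega
        · have hm : c' ∈ rest := by
            rcases List.mem_cons.mp hc' with h1 | h1
            · exact absurd h1 he
            · exact h1
          have hthis := hall c' hm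
          rw [PySem.Dict.getD_modify, if_neg he] at hthis
          have hcnt : (c :: rest).count c' = rest.count c' := by
            simp [Ne.symm he]
          rw [hcnt]
          exact hthis
      · intro hall c' hc'
        by_cases he : c' = c
        · subst he
          have hcc := hall c' (by simp)
          rw [List.count_cons_self] at hcc
          rw [PySem.Dict.getD_modify, if_pos rfl]
          push_cast at hcc
          omega
        · have hcc := hall c' (List.mem_cons_of_mem _ hc')
          have hcnt : (c :: rest).count c' = rest.count c' := by
            simp [Ne.symm he]
          rw [hcnt] at hcc
          rw [PySem.Dict.getD_modify, if_neg he]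
          exact hcc

-- Both programs decide the same proposition: every char of the word occurs at least
-- as often in letters.
theorem portA_iff (word letters : String) :
    is_word_subset_of_letters word letters = true ↔
      ∀ c ∈ word.toList, (word.toList.count c : Int) ≤ (letters.toList.count c : Int) := by
  unfold is_word_subset_of_letters
  rw [PySem.Dict.foldl_insert_getD_add_one_eq_counter]
  rw [awConsume_eq_true_iff _ _ (fun c => by rw [PySem.Dict.getD_counter]; positivity)]
  constructor <;> intro hall c hc <;>
    simpa [PySem.Dict.getD_counter] using hall c hc

theorem portB_iff (word letters : String) :
    is_word_subset_of_letters_alt word letters = true ↔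
      ∀ c ∈ word.toList, (word.toList.count c : Int) ≤ (letters.toList.count c : Int) := by
  unfold is_word_subset_of_letters_alt
  rw [PySem.Dict.foldl_insert_getD_add_one_eq_counter,
      PySem.Dict.foldl_insert_getD_add_one_eq_counter]
  rw [List.all_eq_true]
  constructor
  · intro hall c hc
    have hmem : (c, (word.toList.count c : Int)) ∈ (PySem.Dict.counter word.toList).items := by
      rw [PySem.Dict.items_counter]
      exact List.mem_map.mpr ⟨c, (PySem.Set.mem_ofList _ _).mpr hc, rfl⟩
    have := hall _ hmem
    simpa [PySem.Dict.getD_counter] using this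
  · intro hall p hp
    rw [PySem.Dict.items_counter] at hp
    rcases List.mem_map.mp hp with ⟨c, hc, rfl⟩
    have hc' := (PySem.Set.mem_ofList _ _).mp hc
    simpa [PySem.Dict.getD_counter] using hall c hc'

-- ===== VERDICT (by name: the statement is the Claim_ definition above) =====
theorem is_word_subset_of_letters_spec : Claim_equal_is_word_subset_of_letters := by
  intro word letters _
  unfold Spec_is_word_subset_of_letters
  have h := (portA_iff word letters).trans (portB_iff word letters).symm
  cases ha : is_word_subset_of_letters word letters <;>
    cases hb : is_word_subset_of_letters_alt word letters <;>
    simp_all
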